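-- pv_equiv track=rewrite | github.com/sanjay30052005/HCL-testing | python_practice_solutions/16_cumulative_sum_until_negative.py | cumulative_until_negative
-- ===== SOURCE A (Python) =====
-- def cumulative_until_negative(lst):
--     total=0
--     result=[]
--     for x in lst:
--         if x<0:
--             break
--         total+=x
--         result.append(total)
--     return result
-- ===== SOURCE B (Python) =====
-- def _scan(seg):
--     # divide-and-conquer prefix sums: scan each half, shift the right half
--     # by the total of the left half
--     if len(seg) <= 1:
--         return list(seg)
--     m = len(seg) // 2
--     left = _scan(seg[:m])
--     right = _scan(seg[m:])
--     off = left[-1]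
--     return left + [off + r for r in right]
--
-- def cumulative_until_negative(lst):
--     cut = len(lst)
--     for i, x in enumerate(lst):
--         if x < 0:
--             cut = i
--             break
--     return _scan(lst[:cut])
-- ===== Notes on version B (the rewrite author's own statement) =====
-- stated objective: alternative
-- what changed: Replaces the single guard-and-accumulate loop by first locating the index of the first negative element, slicing that prefix, and computing its running sums with a divide-and-conquer scan (scan each half, shift the right half by the left half's total) instead of a carried accumulator.
import Mathlib
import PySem

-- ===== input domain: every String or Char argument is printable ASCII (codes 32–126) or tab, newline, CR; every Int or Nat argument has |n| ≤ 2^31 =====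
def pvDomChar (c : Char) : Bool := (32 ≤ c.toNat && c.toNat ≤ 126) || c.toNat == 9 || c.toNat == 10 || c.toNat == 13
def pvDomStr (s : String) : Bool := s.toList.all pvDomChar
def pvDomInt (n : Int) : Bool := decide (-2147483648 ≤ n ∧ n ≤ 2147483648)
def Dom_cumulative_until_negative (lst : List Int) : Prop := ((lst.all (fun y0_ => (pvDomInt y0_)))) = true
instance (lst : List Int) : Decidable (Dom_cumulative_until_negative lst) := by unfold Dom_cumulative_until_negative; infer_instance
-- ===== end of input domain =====

-- B replaces A's single accumulator loop by an index search for the first negative,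
-- a slice, and a divide-and-conquer prefix-sum scan of that slice (alternative algorithm, same results).
-- ===== PORT A =====
-- loop of A: carries total and result, breaks on first negative
def cumA (total : Int) (result : List Int) : List Int → List Int
  | [] => result
  | x :: xs => if x < 0 then result else cumA (total + x) (result ++ [total + x]) xs

def cumulative_until_negative (lst : List Int) : List Int := cumA 0 [] lst

-- ===== PORT B =====
-- Source B's for-loop over enumerate(lst): i is the running index; returns the final cut
def findCutB : List Int → Nat → Nat
  | [], i => i
  | x :: xs, i => if x < 0 then i else findCutB xs (i + 1)

-- Source B's _scan: divide-and-conquer prefix sums. seg[-1] of the (always nonempty) left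
-- half is ported as getLastD 0, exact since left ≠ [] whenever this branch runs.
def scanB (l : List Int) : List Int :=
  if _h : l.length ≤ 1 then l
  else
    let m := l.length / 2
    let left := scanB (l.take m)
    let right := scanB (l.drop m)
    left ++ right.map (fun r => left.getLastD 0 + r)
termination_by l.length
decreasing_by
  · simp only [List.length_take]; omega
  · simp only [List.length_drop]; omega

def cumulative_until_negative_alt (lst : List Int) : List Int :=
  scanB (lst.take (findCutB lst 0))

-- ===== PRECONDITION & SPEC =====
def Spec_cumulative_until_negative (lst : List Int) (out : List Int) : Prop := out = cumulative_until_negative_alt lst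
instance (lst : List Int) (out : List Int) : Decidable (Spec_cumulative_until_negative lst out) := by unfold Spec_cumulative_until_negative; infer_instance

-- ===== CLAIM (what is proved, stated in full; the proofs are below) =====
def Claim_equal_cumulative_until_negative : Prop := ∀ (lst : List Int), Dom_cumulative_until_negative lst → Spec_cumulative_until_negative lst (cumulative_until_negative lst)

-- ===== LEMMAS AND PROOFS =====
-- reference sequential scan used only in the proofs
def accumR (acc : Int) : List Int → List Int
  | [] => []
  | x :: xs => (acc + x) :: accumR (acc + x) xs

lemma cumA_eq (total : Int) (result : List Int) (lst : List Int) :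
    cumA total result lst = result ++ accumR total (lst.takeWhile (fun x => x ≥ 0)) := by
  induction lst generalizing total result with
  | nil => simp [cumA, accumR]
  | cons x xs ih =>
    by_cases h : x < 0
    · simp [cumA, h, List.takeWhile, accumR, show ¬ (x ≥ 0) from by omega]
    · simp [cumA, h, List.takeWhile, show x ≥ 0 from by omega, accumR, ih]

lemma accumR_append (a : Int) (xs ys : List Int) :
    accumR a (xs ++ ys) = accumR a xs ++ accumR (a + xs.sum) ys := by
  induction xs generalizing a with
  | nil => simp [accumR]
  | cons x xs ih => simp [accumR, ih]; ring_nf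

lemma accumR_getLastD (a d : Int) (l : List Int) (h : l ≠ []) :
    (accumR a l).getLastD d = a + l.sum := by
  induction l generalizing a d with
  | nil => simp at h
  | cons x xs ih =>
    cases xs with
    | nil => simp [accumR]
    | cons y ys =>
      rw [show accumR a (x :: y :: ys) = (a + x) :: accumR (a + x) (y :: ys) from rfl,
        List.getLastD_cons, ih (a + x) (a + x) (by simp)]
      simp; ring

lemma scanB_eq (l : List Int) : scanB l = accumR 0 l := by
  induction l using scanB.induct with
  | case1 l h =>
    rw [scanB]; simp only [h, dite_true]
    match l, h with
    | [], _ => simp [accumR]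
    | [x], _ => simp [accumR]
  | case2 l h m ihl ihr =>
    rw [scanB]; simp only [h, dite_false]
    have ihl' : scanB (l.take (l.length / 2)) = accumR 0 (l.take (l.length / 2)) := ihl
    have ihr' : scanB (l.drop (l.length / 2)) = accumR 0 (l.drop (l.length / 2)) := ihr
    rw [ihl', ihr']
    set m := l.length / 2 with hm
    have htake : l.take m ≠ [] := by
      have : (l.take m).length = m := by simp [List.length_take]; omega
      intro hnil; rw [hnil] at this; simp at this; omega
    rw [accumR_getLastD 0 0 _ htake]
    have : accumR 0 l = accumR 0 (l.take m ++ l.drop m) := by simp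
    rw [this, accumR_append]
    congr 1
    have hmap : ∀ (a : Int) (xs : List Int), accumR a xs = (accumR 0 xs).map (fun r => a + r) := by
      intro a xs
      induction xs generalizing a with
      | nil => simp [accumR]
      | cons x xs ih =>
        simp only [accumR, List.map_cons, ih (a + x), ih (0 + x), List.map_map]
        norm_num
    rw [hmap (0 + (l.take m).sum)]

lemma findCutB_eq (lst : List Int) (i : Nat) :
    findCutB lst i = i + (lst.takeWhile (fun x => x ≥ 0)).length := by
  induction lst generalizing i with
  | nil => simp [findCutB]
  | cons x xs ih =>
    by_cases h : x < 0
    · simp [findCutB, h, List.takeWhile, show ¬ (x ≥ 0) from by omega]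
    · simp [findCutB, h, List.takeWhile, show x ≥ 0 from by omega, ih]
      omega

lemma take_cut (lst : List Int) :
    lst.take (findCutB lst 0) = lst.takeWhile (fun x => x ≥ 0) := by
  rw [findCutB_eq]
  simp only [Nat.zero_add]
  exact (List.prefix_iff_eq_take.1 (List.takeWhile_prefix _)).symm

-- ===== VERDICT (by name: the statement is the Claim_ definition above) =====
theorem cumulative_until_negative_spec : Claim_equal_cumulative_until_negative := by
  intro lst _
  unfold Spec_cumulative_until_negative cumulative_until_negative cumulative_until_negative_alt
  rw [take_cut, scanB_eq]
  simpa using cumA_eq 0 [] lst
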